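-- pv_equiv track=rewrite | github.com/ravikiran437/gfg | Difficulty: Easy/Tywin's War Strategy/tywins-war-strategy.py | minSoldiers
-- ===== SOURCE A (Python) =====
-- import math
--
-- def minSoldiers(arr, k):
--     # code here
--     n = math.ceil(len(arr) / 2)
--
--     count = 0
--     l = []
--     for num in arr:
--         if num % k == 0:
--             count += 1
--         else:
--             l.append(k - (num % k))
--     req = n - count
--
--     if req <= 0:
--         return 0
--     l.sort()
--
--     return sum(l[:req])
-- ===== SOURCE B (Python) =====
-- def minSoldiers(arr, k):
--     # Count multiples directly; bucket the needed top-ups (-num) % k in a dict,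
--     # then take the req smallest greedily over the sorted DISTINCT top-up values.
--     req = -(-len(arr) // 2)
--     cnt = {}
--     for num in arr:
--         r = (-num) % k
--         if r == 0:
--             req -= 1
--         else:
--             cnt[r] = cnt.get(r, 0) + 1
--     if req <= 0:
--         return 0
--     total = 0
--     for v in sorted(cnt):
--         if req <= 0:
--             break
--         take = cnt[v] if cnt[v] < req else req
--         total += v * take
--         req -= take
--     return total
-- ===== Notes on version B (the rewrite author's own statement) =====
-- stated objective: alternative
-- what changed: A builds the full list of top-up amounts, sorts it and sums a prefix; B counts each distinct top-up amount in a dict and greedily takes the req smallest over the sorted distinct values, so only the distinct amounts are sorted.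
-- outside the precondition, e.g. on minSoldiers([1, 2, 3], 0): A raises ZeroDivisionError, B raises ZeroDivisionError
import Mathlib
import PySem

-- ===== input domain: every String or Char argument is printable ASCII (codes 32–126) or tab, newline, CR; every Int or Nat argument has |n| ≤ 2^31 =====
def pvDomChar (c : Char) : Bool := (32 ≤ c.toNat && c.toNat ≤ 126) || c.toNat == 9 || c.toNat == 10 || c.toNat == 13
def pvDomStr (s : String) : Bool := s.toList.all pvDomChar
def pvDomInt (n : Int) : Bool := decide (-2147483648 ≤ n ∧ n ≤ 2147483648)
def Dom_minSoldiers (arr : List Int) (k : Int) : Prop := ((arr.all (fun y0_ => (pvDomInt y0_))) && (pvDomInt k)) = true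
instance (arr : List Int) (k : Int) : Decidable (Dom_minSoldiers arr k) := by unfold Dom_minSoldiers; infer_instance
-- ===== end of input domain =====

-- B replaces A's sort of the whole top-up list by a dict of top-up multiplicities and a greedy pass
-- over the sorted DISTINCT top-up values (objective: alternative; return value proved equal for k ≠ 0).


-- ===== PORT A =====
def minSoldiers (arr : List Int) (k : Int) : Int :=
  -- math.ceil(len(arr)/2) ported as -((-len)//2): exact here, float division of such an int by 2 is exact
  let n : Int := -(PySem.Int.floordiv (-(arr.length : Int)) 2)
  let s := arr.foldl (fun (s : Int × List Int) num =>
    if PySem.Int.mod num k = 0 then (s.1 + 1, s.2)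
    else (s.1, s.2 ++ [k - PySem.Int.mod num k])) (0, [])
  let req := n - s.1
  if req ≤ 0 then 0
  else (PySem.List.slice (PySem.List.sorted s.2 (fun x => x) false) none (some req)).sum

-- ===== PORT B =====
-- the 'for v in sorted(cnt): if req <= 0: break; …' loop of Source B
def bLoop (cnt : PySem.Dict Int Int) : List Int → Int → Int → Int
  | [], _, total => total
  | v :: rest, req, total =>
    if req ≤ 0 then total
    else
      let c := cnt.getD v 0
      let take := if c < req then c else req
      bLoop cnt rest (req - take) (total + v * take)

def minSoldiers_alt (arr : List Int) (k : Int) : Int :=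
  let s := arr.foldl (fun (s : Int × PySem.Dict Int Int) num =>
    let r := PySem.Int.mod (-num) k
    if r = 0 then (s.1 - 1, s.2)
    else (s.1, s.2.insert r (s.2.getD r 0 + 1)))
    (-(PySem.Int.floordiv (-(arr.length : Int)) 2), PySem.Dict.empty)
  if s.1 ≤ 0 then 0
  else bLoop s.2 (PySem.List.sorted s.2.keys (fun x => x) false) s.1 0

-- ===== PRECONDITION & SPEC =====
-- Pre_ excludes only k = 0, on which Python A raises ZeroDivisionError
def Pre_minSoldiers (arr : List Int) (k : Int) : Prop := k ≠ 0
instance (arr : List Int) (k : Int) : Decidable (Pre_minSoldiers arr k) := by unfold Pre_minSoldiers; infer_instance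
def pvWitness_minSoldiers : List Int × Int := ([1, 2, 3], 2)

def Spec_minSoldiers (arr : List Int) (k : Int) (out : Int) : Prop := out = minSoldiers_alt arr k
instance (arr : List Int) (k : Int) (out : Int) : Decidable (Spec_minSoldiers arr k out) := by unfold Spec_minSoldiers; infer_instance

-- ===== CLAIM (what is proved, stated in full; the proofs are below) =====
def Claim_equal_minSoldiers : Prop := ∀ (arr : List Int) (k : Int), Dom_minSoldiers arr k → Pre_minSoldiers arr k → Spec_minSoldiers arr k (minSoldiers arr k)

-- ===== LEMMAS AND PROOFS =====

-- the list of top-ups A accumulates, in order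
def resids (k : Int) (arr : List Int) : List Int :=
  (arr.filter (fun num => !(PySem.Int.mod num k == 0))).map (fun num => k - PySem.Int.mod num k)

theorem mod_neg_zero_iff (a k : Int) : (PySem.Int.mod (-a) k = 0) ↔ (PySem.Int.mod a k = 0) := by
  rw [PySem.Int.mod_eq_zero_iff_dvd, PySem.Int.mod_eq_zero_iff_dvd, dvd_neg]

-- Python's (-a) % k equals k - a % k on non-multiples, for either sign of k
theorem mod_neg_eq (a k : Int) (hk : k ≠ 0) (h : PySem.Int.mod a k ≠ 0) :
    PySem.Int.mod (-a) k = k - PySem.Int.mod a k := by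
  have h1 := PySem.Int.floordiv_mul_add_mod a k
  have h2 := PySem.Int.floordiv_mul_add_mod (-a) k
  set q := PySem.Int.floordiv a k
  set q' := PySem.Int.floordiv (-a) k
  set r := PySem.Int.mod a k
  set s := PySem.Int.mod (-a) k
  have hsum : s + r = -(q + q') * k := by linarith
  rcases lt_or_gt_of_ne hk with hneg | hpos
  · obtain ⟨hr1, hr2⟩ := PySem.Int.mod_neg_bounds a hneg
    obtain ⟨hs1, hs2⟩ := PySem.Int.mod_neg_bounds (-a) hneg
    have hr0 : r < 0 := lt_of_le_of_ne hr2 h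
    have hc : -(q + q') = 1 := by
      by_contra hc
      rcases lt_or_gt_of_ne hc with hlt | hgt
      · nlinarith
      · nlinarith
    rw [hc] at hsum; linarith
  · have hr1 := PySem.Int.mod_nonneg a hpos
    have hr2 := PySem.Int.mod_lt a hpos
    have hs1 := PySem.Int.mod_nonneg (-a) hpos
    have hs2 := PySem.Int.mod_lt (-a) hpos
    have hs0 : s ≠ 0 := by
      intro hs0
      have hd : k ∣ -a := by rw [← PySem.Int.mod_eq_zero_iff_dvd]; exact hs0
      exact h (by rw [PySem.Int.mod_eq_zero_iff_dvd]; exact (dvd_neg).mp hd)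
    have hc : -(q + q') = 1 := by
      by_contra hc
      rcases lt_or_gt_of_ne hc with hlt | hgt
      · nlinarith [lt_of_le_of_ne hs1 (Ne.symm hs0), lt_of_le_of_ne hr1 (Ne.symm h)]
      · nlinarith
    rw [hc] at hsum; linarith

theorem foldA (k : Int) (arr : List Int) : ∀ (c : Int) (l : List Int),
    arr.foldl (fun (s : Int × List Int) num =>
      if PySem.Int.mod num k = 0 then (s.1 + 1, s.2)
      else (s.1, s.2 ++ [k - PySem.Int.mod num k])) (c, l)
    = (c + (arr.countP (fun num => PySem.Int.mod num k == 0) : Int), l ++ resids k arr) := by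
  induction arr with
  | nil => intro c l; simp [resids]
  | cons x xs ih =>
    intro c l
    by_cases hx : PySem.Int.mod x k = 0
    · simp [List.foldl_cons, hx, ih, resids]; ring
    · simp [List.foldl_cons, hx, ih, resids]

theorem foldB (k : Int) (hk : k ≠ 0) (arr : List Int) : ∀ (t : Int) (d : PySem.Dict Int Int),
    arr.foldl (fun (s : Int × PySem.Dict Int Int) num =>
      let r := PySem.Int.mod (-num) k
      if r = 0 then (s.1 - 1, s.2)
      else (s.1, s.2.insert r (s.2.getD r 0 + 1))) (t, d)
    = (t - (arr.countP (fun num => PySem.Int.mod num k == 0) : Int),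
       (resids k arr).foldl (fun d x => d.insert x (d.getD x 0 + 1)) d) := by
  induction arr with
  | nil => intro t d; simp [resids]
  | cons x xs ih =>
    intro t d
    by_cases hx : PySem.Int.mod x k = 0
    · have hx' : PySem.Int.mod (-x) k = 0 := (mod_neg_zero_iff x k).mpr hx
      simp [List.foldl_cons, hx, hx', ih, resids]
      ring
    · have hx' : PySem.Int.mod (-x) k = k - PySem.Int.mod x k := mod_neg_eq x k hk hx
      have hx'' : ¬ (PySem.Int.mod (-x) k = 0) := by
        rw [mod_neg_zero_iff]; exact hx
      simp only [List.foldl_cons, if_neg hx'', ih, resids, List.filter_cons, List.foldl_cons]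
      simp [hx, hx']

-- bLoop over ANY key list, with the counter of ls, computes the blockwise take-sum
theorem bLoop_flat (ls : List Int) : ∀ (D : List Int) (req total : Int), 0 ≤ req →
    bLoop (PySem.Dict.counter ls) D req total
    = total + ((D.flatMap (fun v => List.replicate (ls.count v) v)).take req.toNat).sum := by
  intro D
  induction D with
  | nil => intro req total h; simp [bLoop]
  | cons v rest ih =>
    intro req total h
    rw [bLoop]
    by_cases hreq : req ≤ 0
    · have : req = 0 := le_antisymm hreq h
      subst this
      simp
    · simp only [if_neg hreq]
      rw [PySem.Dict.getD_counter]
      set c : Int := (ls.count v : Int) with hc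
      have hc0 : 0 ≤ c := by positivity
      have hreq' : 0 < req := lt_of_not_ge hreq
      by_cases hlt : c < req
      · rw [if_pos hlt, ih _ _ (by omega)]
        simp only [List.flatMap_cons, List.take_append, List.sum_append,
          List.take_replicate, List.sum_replicate, List.length_replicate, nsmul_eq_mul]
        have e1 : min req.toNat (ls.count v) = ls.count v := by omega
        have e2 : (req - c).toNat = req.toNat - ls.count v := by omega
        rw [e1, e2]
        ring
      · rw [if_neg hlt, ih _ _ (by omega)]
        simp only [List.flatMap_cons, List.take_append, List.sum_append,
          List.take_replicate, List.sum_replicate, List.length_replicate, nsmul_eq_mul]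
        have e1 : min req.toNat (ls.count v) = req.toNat := by omega
        have e2 : (req - req).toNat = 0 := by omega
        have e3 : req.toNat - ls.count v = 0 := by omega
        have e4 : (req.toNat : Int) = req := Int.toNat_of_nonneg h
        rw [e1, e2, e3, e4]
        simp
        ring

theorem flat_count (ls : List Int) (x : Int) : ∀ (D : List Int), D.Nodup →
    (D.flatMap (fun v => List.replicate (ls.count v) v)).count x
    = if x ∈ D then ls.count x else 0 := by
  intro D
  induction D with
  | nil => simp
  | cons v rest ih =>
    intro hnd
    rw [List.nodup_cons] at hnd
    simp only [List.flatMap_cons, List.count_append, List.count_replicate, ih hnd.2]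
    by_cases hxv : x = v
    · subst hxv
      simp [hnd.1]
    · simp [hxv, Ne.symm hxv]

theorem flat_perm (ls D : List Int) (hD : D.Nodup) (hmem : ∀ x, x ∈ D ↔ x ∈ ls) :
    (D.flatMap (fun v => List.replicate (ls.count v) v)).Perm ls := by
  rw [List.perm_iff_count]
  intro x
  rw [flat_count ls x D hD]
  by_cases hx : x ∈ D
  · simp [hx]
  · have : x ∉ ls := fun h => hx ((hmem x).mpr h)
    simp [hx, List.count_eq_zero_of_not_mem this]

theorem flat_pairwise (ls : List Int) : ∀ (D : List Int), D.Pairwise (· < ·) →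
    (D.flatMap (fun v => List.replicate (ls.count v) v)).Pairwise (· ≤ ·) := by
  intro D
  induction D with
  | nil => simp
  | cons v rest ih =>
    intro hp
    rw [List.pairwise_cons] at hp
    simp only [List.flatMap_cons]
    rw [List.pairwise_append]
    refine ⟨List.pairwise_replicate.mpr (Or.inr le_rfl), ih hp.2, ?_⟩
    intro a ha b hb
    have hav : a = v := List.eq_of_mem_replicate ha
    rw [List.mem_flatMap] at hb
    obtain ⟨v', hv', hb⟩ := hb
    have hbv : b = v' := List.eq_of_mem_replicate hb
    subst hav
    rw [hbv]
    exact le_of_lt (hp.1 v' hv')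

-- sorted ls is the concatenation of constant blocks over the sorted distinct values
theorem sorted_eq_flat (ls : List Int) :
    PySem.List.sorted ls (fun x => x) false
    = (PySem.List.sorted (PySem.Set.ofList ls) (fun x => x) false).flatMap
        (fun v => List.replicate (ls.count v) v) := by
  have hperm : (PySem.List.sorted (PySem.Set.ofList ls) (fun x => x) false).Perm (PySem.Set.ofList ls) :=
    PySem.List.sorted_perm _ _ _
  have hnd : (PySem.List.sorted (PySem.Set.ofList ls) (fun x => x) false).Nodup :=
    hperm.nodup_iff.mpr (PySem.Set.nodup_ofList ls)
  have hmem : ∀ x, x ∈ PySem.List.sorted (PySem.Set.ofList ls) (fun x => x) false ↔ x ∈ ls := by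
    intro x
    rw [PySem.List.mem_sorted, PySem.Set.mem_ofList]
  exact PySem.List.sorted_id_eq_of_perm_of_pairwise _ _
    (flat_perm ls _ hnd hmem)
    (flat_pairwise ls _ (PySem.List.sorted_ofList_pairwise_lt ls))

-- ===== VERDICT (by name: the statement is the Claim_ definition above) =====
theorem minSoldiers_spec : Claim_equal_minSoldiers := by
  intro arr k _hdom hk
  show minSoldiers arr k = minSoldiers_alt arr k
  unfold minSoldiers minSoldiers_alt
  rw [foldA k arr 0 [], foldB k hk arr _ _]
  simp only [zero_add, List.nil_append]
  set n : Int := -(PySem.Int.floordiv (-(arr.length : Int)) 2)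
  set cnt : Int := (arr.countP (fun num => PySem.Int.mod num k == 0) : Int)
  set ls := resids k arr
  by_cases hreq : n - cnt ≤ 0
  · simp [hreq]
  · simp only [if_neg hreq]
    have h0 : (0:Int) ≤ n - cnt := by omega
    rw [PySem.List.slice_to _ h0]
    rw [PySem.Dict.foldl_insert_getD_add_one_eq_counter, PySem.Dict.keys_counter]
    rw [bLoop_flat ls _ _ _ h0, sorted_eq_flat ls, zero_add]
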